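-- pv_equiv track=rewrite | github.com/CaoRX/CTL | src/CTL/tensor/diagonalTensor.py | checkShapeDiagonalCompatible
-- ===== SOURCE A (Python) =====
-- def checkShapeDiagonalCompatible(shape):
--     """
--     Check whether the shape can form a diagonal tensor, with all the indices have the same dimension.
--
--     Parameters
--     ----------
--     shape : tuple of int
--         Shape of the tensor that already existed before creating the tensor.
--
--     Returns
--     -------
--     bool
--         Whether the legs can form a diagonal tensor.
--     """
--     if (len(shape) == 0):
--         return True
--     l = shape[0]
--     for dim in shape:
--         if (dim != l):
--             return False
--     return True
-- ===== SOURCE B (Python) =====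
-- def checkShapeDiagonalCompatible(shape):
--     return len(set(shape)) <= 1
-- ===== Notes on version B (the rewrite author's own statement) =====
-- stated objective: idiomatic
-- what changed: Replaces the empty-case guard plus the explicit scan comparing every dimension against the first with a one-liner that builds the set of distinct dimensions and checks it has at most one element.
import Mathlib
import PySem

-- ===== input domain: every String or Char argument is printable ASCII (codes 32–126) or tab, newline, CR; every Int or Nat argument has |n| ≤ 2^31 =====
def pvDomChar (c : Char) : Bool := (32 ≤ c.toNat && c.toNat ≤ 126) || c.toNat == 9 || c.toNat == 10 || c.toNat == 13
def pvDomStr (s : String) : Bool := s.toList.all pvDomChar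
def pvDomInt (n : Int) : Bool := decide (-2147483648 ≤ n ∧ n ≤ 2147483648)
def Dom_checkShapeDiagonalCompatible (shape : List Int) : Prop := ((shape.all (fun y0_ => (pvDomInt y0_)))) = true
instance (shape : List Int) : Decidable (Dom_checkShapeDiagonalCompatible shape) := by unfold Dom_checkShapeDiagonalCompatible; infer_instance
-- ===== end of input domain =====

-- B replaces A's empty-case guard and explicit scan against shape[0] with len(set(shape)) <= 1 (idiomatic; same cost).

-- ===== PORT A =====
-- the 'for dim in shape' loop with its early 'return False'
def pvLoopA (l : Int) : List Int → Bool
  | [] => true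
  | d :: rest => if d ≠ l then false else pvLoopA l rest

def checkShapeDiagonalCompatible (shape : List Int) : Bool :=
  match shape with
  | [] => true            -- if len(shape) == 0: return True
  | l :: _ => pvLoopA l shape   -- l = shape[0]; loop over shape

-- ===== PORT B =====
def checkShapeDiagonalCompatible_alt (shape : List Int) : Bool :=
  decide ((PySem.Set.ofList shape).length ≤ 1)

-- ===== PRECONDITION & SPEC =====
def Spec_checkShapeDiagonalCompatible (shape : List Int) (out : Bool) : Prop := out = checkShapeDiagonalCompatible_alt shape
instance (shape : List Int) (out : Bool) : Decidable (Spec_checkShapeDiagonalCompatible shape out) := by unfold Spec_checkShapeDiagonalCompatible; infer_instance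

-- ===== CLAIM (what is proved, stated in full; the proofs are below) =====
def Claim_equal_checkShapeDiagonalCompatible : Prop := ∀ (shape : List Int), Dom_checkShapeDiagonalCompatible shape → Spec_checkShapeDiagonalCompatible shape (checkShapeDiagonalCompatible shape)

-- ===== LEMMAS AND PROOFS =====

theorem length_le_foldl_add (xs : List Int) (s : PySem.Set Int) :
    s.length ≤ (xs.foldl PySem.Set.add s).length := by
  induction xs generalizing s with
  | nil => simp
  | cons d rest ih =>
    refine le_trans ?_ (ih (PySem.Set.add s d))
    simp [PySem.Set.add]
    split <;> simp

theorem foldl_add_singleton (rest : List Int) (l : Int) :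
    ((rest.foldl PySem.Set.add [l]).length ≤ 1) ↔ pvLoopA l rest = true := by
  induction rest with
  | nil => simp [pvLoopA]
  | cons d rs ih =>
    by_cases h : d = l
    · subst h
      simpa [List.foldl, PySem.Set.add, PySem.Set.contains, pvLoopA] using ih
    · have hadd : PySem.Set.add ([l] : PySem.Set Int) d = [l, d] := by
        simp [PySem.Set.add, PySem.Set.contains, h]
      have hlen : 2 ≤ (rs.foldl PySem.Set.add [l, d]).length := by
        simpa using length_le_foldl_add rs [l, d]
      simp [List.foldl, pvLoopA, h]
      omega

theorem loopA_self (l : Int) (rest : List Int) :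
    pvLoopA l (l :: rest) = pvLoopA l rest := by
  simp [pvLoopA]

-- ===== VERDICT (by name: the statement is the Claim_ definition above) =====
theorem checkShapeDiagonalCompatible_spec : Claim_equal_checkShapeDiagonalCompatible := by
  intro shape _
  unfold Spec_checkShapeDiagonalCompatible checkShapeDiagonalCompatible checkShapeDiagonalCompatible_alt
  match shape with
  | [] => decide
  | l :: rest =>
    have h := foldl_add_singleton rest l
    have hof : PySem.Set.ofList (l :: rest) = rest.foldl PySem.Set.add [l] := by
      simp [PySem.Set.ofList_eq_foldl, List.foldl, PySem.Set.add]
    show pvLoopA l (l :: rest) = _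
    rw [loopA_self, hof]
    by_cases hb : pvLoopA l rest = true
    · simp [hb, h.mpr hb]
    · have : ¬ ((rest.foldl PySem.Set.add [l]).length ≤ 1) := fun hc => hb (h.mp hc)
      rw [Bool.eq_false_iff.mpr hb, decide_eq_false this]
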